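-- pv_equiv track=rewrite | github.com/pmatsinopoulos/effective_python | 23_1_accept_functions_for_simple_Interfaces_instead_of_classes.py | increment_with_report
-- ===== SOURCE A (Python) =====
-- from collections import defaultdict
--
-- def increment_with_report(current, increments):
--     added_count = {'count': 0}
--
--     def missing():
--         added_count['count'] += 1
--         return 0
--
--     result = defaultdict(missing, current)
--
--     for key, amount in increments:
--         result[key] += amount
--
--     return result, added_count['count']
-- ===== SOURCE B (Python) =====
-- from collections import defaultdict
--
-- def increment_with_report(current, increments):
--     result = defaultdict(int, current)
--     added_count = len({key for key, _ in increments} - set(result))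
--     for key, amount in increments:
--         result[key] += amount
--     return result, added_count
-- ===== Notes on version B (the rewrite author's own statement) =====
-- stated objective: simpler
-- what changed: B replaces A's closure-and-mutable-dict counter hidden in the defaultdict factory by a plain defaultdict(int) plus a set-difference that counts the new keys up front, so the increment loop carries no counting side effect.
import Mathlib
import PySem

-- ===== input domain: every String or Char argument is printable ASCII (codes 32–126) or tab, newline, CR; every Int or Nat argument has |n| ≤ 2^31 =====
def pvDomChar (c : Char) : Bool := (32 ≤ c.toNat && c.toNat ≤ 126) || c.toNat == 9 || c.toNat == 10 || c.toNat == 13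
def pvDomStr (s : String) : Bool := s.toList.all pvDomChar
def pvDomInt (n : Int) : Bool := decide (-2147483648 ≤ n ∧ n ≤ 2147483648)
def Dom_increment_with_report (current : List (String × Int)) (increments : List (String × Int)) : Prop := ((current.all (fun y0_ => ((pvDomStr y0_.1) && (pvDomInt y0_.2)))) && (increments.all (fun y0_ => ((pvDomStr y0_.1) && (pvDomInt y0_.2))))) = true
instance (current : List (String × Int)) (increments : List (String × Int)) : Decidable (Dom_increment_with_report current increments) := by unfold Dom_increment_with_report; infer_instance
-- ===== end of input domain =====

-- B computes the added-key count by a set difference before the loop instead of A's mutable counter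
-- hidden inside the defaultdict factory; same cost, simpler control flow (objective: simpler).

-- ===== PORT A =====
-- result = defaultdict(missing, current); each increment does result[key] += amount, where a missing
-- key calls the factory: it bumps the counter and yields 0.  State = (dict, counter).
def increment_with_report (current : List (String × Int)) (increments : List (String × Int)) : (List (String × Int)) × Int :=
  let r := increments.foldl
    (fun (p : PySem.Dict String Int × Int) kv =>
      match p.1.get? kv.1 with
      | some v => (p.1.insert kv.1 (v + kv.2), p.2)        -- key present: factory not called
      | none   => (p.1.insert kv.1 (0 + kv.2), p.2 + 1))   -- missing(): count += 1, returns 0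
    (PySem.Dict.ofList current, 0)
  (r.1.items, r.2)

-- ===== PORT B =====
-- result = defaultdict(int, current); added_count = len({key for key, _ in increments} - set(result));
-- then a plain accumulation loop: result[key] += amount.
def increment_with_report_alt (current : List (String × Int)) (increments : List (String × Int)) : (List (String × Int)) × Int :=
  let result := PySem.Dict.ofList current
  let added_count : Int :=
    (PySem.Set.diff (PySem.Set.ofList (increments.map (·.1))) result.keys).length
  let final := increments.foldl (fun d kv => d.insert kv.1 (d.getD kv.1 0 + kv.2)) result
  (final.items, added_count)

-- ===== PRECONDITION & SPEC =====
def Spec_increment_with_report (current : List (String × Int)) (increments : List (String × Int)) (out : (List (String × Int)) × Int) : Prop := out = increment_with_report_alt current increments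
instance (current : List (String × Int)) (increments : List (String × Int)) (out : (List (String × Int)) × Int) : Decidable (Spec_increment_with_report current increments out) := by unfold Spec_increment_with_report; infer_instance

-- ===== CLAIM (what is proved, stated in full; the proofs are below) =====
def Claim_equal_increment_with_report : Prop := ∀ (current : List (String × Int)) (increments : List (String × Int)), Dom_increment_with_report current increments → Spec_increment_with_report current increments (increment_with_report current increments)

-- ===== LEMMAS AND PROOFS =====

-- A's loop state (dict, counter) equals B's plain loop paired with the number of distinct increment
-- keys not already among d's keys (counted from the front, as in Set.diff ∘ Set.ofList).
lemma increment_loop_eq (l : List (String × Int)) :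
    ∀ (d : PySem.Dict String Int) (c : Int),
      l.foldl
        (fun (p : PySem.Dict String Int × Int) kv =>
          match p.1.get? kv.1 with
          | some v => (p.1.insert kv.1 (v + kv.2), p.2)
          | none   => (p.1.insert kv.1 (0 + kv.2), p.2 + 1)) (d, c)
      = (l.foldl (fun d kv => d.insert kv.1 (d.getD kv.1 0 + kv.2)) d,
         c + (((PySem.Set.ofList (l.map (·.1))).filter (fun y => !(d.keys.contains y))).length : Int)) := by
  induction l with
  | nil => intro d c; simp
  | cons kv rest ih =>
    intro d c
    obtain ⟨k, a⟩ := kv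
    by_cases h : d.get? k = none
    · -- key missing: factory fires, counter += 1, value starts at 0
      have hc : d.contains k = false := (PySem.Dict.get?_eq_none_iff_contains d k).mp h
      have hk : k ∉ d.keys := by
        intro hm
        exact absurd ((PySem.Dict.contains_iff_mem_keys d k).mpr hm) (by simp [hc])
      simp only [List.foldl_cons, h, PySem.Dict.getD_of_get?_eq_none d 0 h]
      rw [ih]
      refine Prod.ext rfl ?_
      have hkeys : (d.insert k (0 + a)).keys = d.keys ++ [k] :=
        PySem.Dict.keys_insert_of_not_contains d (0 + a) hc
      simp only [hkeys, List.map_cons, PySem.Set.ofList_cons, PySem.Set.discard]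
      have hfilt :
          ((PySem.Set.ofList (rest.map (·.1))).filter
              (fun y => !((d.keys ++ [k]).contains y)))
          = (((PySem.Set.ofList (rest.map (·.1))).filter (fun y => !(y == k))).filter
              (fun y => !(d.keys.contains y))) := by
        rw [List.filter_filter]
        refine List.filter_congr ?_
        intro y _
        by_cases hyk : y = k <;> simp [hyk]
      rw [hfilt]
      have hpk : (!(d.keys.contains k)) = true := by simp [List.contains_eq_mem, hk]
      simp only [List.filter_cons, hpk, if_true, List.length_cons]
      push_cast
      ring
    · -- key present: counter untouched
      obtain ⟨v, hv⟩ := Option.ne_none_iff_exists'.mp h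
      have hc : d.contains k = true := by
        rw [PySem.Dict.contains_eq_isSome_get?, hv]; rfl
      simp only [List.foldl_cons, hv, PySem.Dict.getD_of_get?_eq_some d 0 hv]
      rw [ih]
      refine Prod.ext rfl ?_
      have hkeys : (d.insert k (v + a)).keys = d.keys :=
        PySem.Dict.keys_insert_of_contains d (v + a) hc
      have hk : k ∈ d.keys := (PySem.Dict.contains_iff_mem_keys d k).mp hc
      have hpk : (!(d.keys.contains k)) = false := by simp [List.contains_eq_mem, hk]
      simp only [hkeys, List.map_cons, PySem.Set.ofList_cons, PySem.Set.discard,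
        List.filter_cons, hpk, Bool.false_eq_true, if_false]
      rw [List.filter_filter]
      congr 3
      refine (List.filter_congr ?_).symm
      intro y _
      by_cases hyk : y = k <;> simp [hyk, List.contains_eq_mem, hk]

-- ===== VERDICT (by name: the statement is the Claim_ definition above) =====
theorem increment_with_report_spec : Claim_equal_increment_with_report := by
  intro current increments _
  unfold Spec_increment_with_report increment_with_report increment_with_report_alt
  rw [increment_loop_eq]
  simp [PySem.Set.diff, PySem.Set.contains]
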